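-- pv_equiv track=rewrite | github.com/ccnmtl/mvsim | engine/simple_controller.py | get_interval_class
-- ===== SOURCE A (Python) =====
-- def get_interval_class(value, intervals):
--     intervals = sorted(intervals)
--     interval_classes = ["completely_empty", "mostly_empty", "partially_empty",
--                         "partially_full", "completely_full"]
--     for number, string in zip(intervals, interval_classes):
--         if value < number:
--             return string
--     return interval_classes[-1]
-- ===== SOURCE B (Python) =====
-- def get_interval_class(value, intervals):
--     s = sorted(intervals)
--     labels = ["completely_empty", "mostly_empty", "partially_empty",
--               "partially_full", "completely_full"]
--     # binary search for the insertion point (bisect_right) instead of a linear scan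
--     lo, hi = 0, len(s)
--     while lo < hi:
--         mid = (lo + hi) // 2
--         if value < s[mid]:
--             hi = mid
--         else:
--             lo = mid + 1
--     if lo < min(len(s), 5):
--         return labels[lo]
--     return labels[-1]
-- ===== Notes on version B (the rewrite author's own statement) =====
-- stated objective: alternative
-- what changed: Replaces the sequential zip(thresholds, labels) scan with a hand-rolled binary search (bisect_right) on the sorted thresholds, then indexes the label list, keeping labels[-1] when the insertion point reaches min(len, 5).
import Mathlib
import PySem

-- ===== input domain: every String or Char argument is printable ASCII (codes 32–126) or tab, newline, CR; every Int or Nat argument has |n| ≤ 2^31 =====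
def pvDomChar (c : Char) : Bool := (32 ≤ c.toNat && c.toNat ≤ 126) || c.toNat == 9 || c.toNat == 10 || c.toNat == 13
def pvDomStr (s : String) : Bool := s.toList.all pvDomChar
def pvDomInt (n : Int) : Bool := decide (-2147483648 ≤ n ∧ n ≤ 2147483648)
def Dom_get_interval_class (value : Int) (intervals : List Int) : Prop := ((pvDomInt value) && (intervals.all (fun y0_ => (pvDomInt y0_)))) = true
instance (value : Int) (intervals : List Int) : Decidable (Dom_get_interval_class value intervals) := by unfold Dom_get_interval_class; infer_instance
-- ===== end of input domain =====

-- B replaces A's sequential zip(thresholds, labels) scan by a hand-rolled binary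
-- search (bisect_right) over the sorted thresholds, then indexes the label list
-- (objective: alternative algorithm, same result).

-- ===== PORT A =====
def pvLabels : List String :=
  ["completely_empty", "mostly_empty", "partially_empty", "partially_full", "completely_full"]

-- the 'for number, string in zip(intervals, interval_classes)' loop;
-- the final 'return interval_classes[-1]' is the constant "completely_full"
def pvScanA (value : Int) : List (Int × String) → String
  | [] => "completely_full"
  | (number, string) :: rest => if value < number then string else pvScanA value rest

def get_interval_class (value : Int) (intervals : List Int) : String :=
  pvScanA value ((PySem.List.sorted intervals (fun x => x) false).zip pvLabels)

-- ===== PORT B =====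
-- the 'while lo < hi' binary-search loop of Source B; s[mid] is in range whenever
-- hi ≤ s.length, so the getD default is never used (exact on that domain);
-- fuel ≥ hi - lo only bounds the iteration count (structural recursion)
def pvBisect (value : Int) (s : List Int) : Nat → Nat → Nat → Nat
  | 0, lo, _ => lo
  | fuel + 1, lo, hi =>
    if lo < hi then
      let mid := (lo + hi) / 2
      if value < s.getD mid 0 then pvBisect value s fuel lo mid
      else pvBisect value s fuel (mid + 1) hi
    else lo

def get_interval_class_alt (value : Int) (intervals : List Int) : String :=
  let s := PySem.List.sorted intervals (fun x => x) false
  let labels : List String :=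
    ["completely_empty", "mostly_empty", "partially_empty", "partially_full", "completely_full"]
  let pos := pvBisect value s s.length 0 s.length
  if pos < min s.length 5 then (PySem.List.pyGet? labels (pos : Int)).getD ""
  else (PySem.List.pyGet? labels (-1)).getD ""

-- ===== PRECONDITION & SPEC =====
def Spec_get_interval_class (value : Int) (intervals : List Int) (out : String) : Prop := out = get_interval_class_alt value intervals
instance (value : Int) (intervals : List Int) (out : String) : Decidable (Spec_get_interval_class value intervals out) := by unfold Spec_get_interval_class; infer_instance

-- ===== CLAIM =====
def Claim_equal_get_interval_class : Prop := ∀ (value : Int) (intervals : List Int), Dom_get_interval_class value intervals → Spec_get_interval_class value intervals (get_interval_class value intervals)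

-- ===== LEMMAS AND PROOFS =====

-- on a ≤-sorted list, getD is monotone over in-range indices
lemma pv_sorted_mono (s : List Int) (hs : s.Pairwise (· ≤ ·)) :
    ∀ i j : Nat, i ≤ j → j < s.length → s.getD i 0 ≤ s.getD j 0 := by
  intro i j hij hj
  rcases Nat.eq_or_lt_of_le hij with h | h
  · subst h; exact le_refl _
  · rw [List.getD_eq_getElem _ _ (by omega), List.getD_eq_getElem _ _ hj]
    exact List.pairwise_iff_getElem.mp hs i j (by omega) hj h

-- pvBisect computes the insertion point (bisect_right) on a sorted segment
lemma pvBisect_spec (v : Int) (s : List Int) (hs : s.Pairwise (· ≤ ·)) :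
    ∀ (fuel lo hi : Nat), hi - lo ≤ fuel → lo ≤ hi → hi ≤ s.length →
      (∀ i, i < lo → s.getD i 0 ≤ v) →
      (∀ i, hi ≤ i → i < s.length → v < s.getD i 0) →
      pvBisect v s fuel lo hi ≤ s.length ∧
        (∀ i, i < pvBisect v s fuel lo hi → s.getD i 0 ≤ v) ∧
        (∀ i, pvBisect v s fuel lo hi ≤ i → i < s.length → v < s.getD i 0) := by
  intro fuel
  induction fuel with
  | zero =>
    intro lo hi hf hlh hhl h1 h2
    have : lo = hi := by omega
    subst this
    simp only [pvBisect]
    exact ⟨by omega, h1, h2⟩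
  | succ n ih =>
    intro lo hi hf hlh hhl h1 h2
    simp only [pvBisect]
    by_cases hlt : lo < hi
    · simp only [hlt, if_true]
      have hmid₁ : lo ≤ (lo + hi) / 2 := by omega
      have hmid₂ : (lo + hi) / 2 < hi := by omega
      by_cases hv : v < s.getD ((lo + hi) / 2) 0
      · simp only [hv, if_true]
        exact ih lo ((lo + hi) / 2) (by omega) (by omega) (by omega) h1
          (fun i hi' hil =>
            lt_of_lt_of_le hv (pv_sorted_mono s hs _ i hi' hil))
      · simp only [hv, if_false]
        have hmv : s.getD ((lo + hi) / 2) 0 ≤ v := le_of_not_gt hv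
        exact ih ((lo + hi) / 2 + 1) hi (by omega) (by omega) hhl
          (fun i hi' =>
            le_trans (pv_sorted_mono s hs i ((lo + hi) / 2) (by omega) (by omega)) hmv)
          h2
    · simp only [hlt, if_false]
      have : lo = hi := by omega
      subst this
      exact ⟨by omega, h1, h2⟩

-- A's zip scan, characterised by any insertion point p
lemma pv_scan_char (v : Int) :
    ∀ (s : List Int) (L : List String) (p : Nat),
      (∀ i, i < p → s.getD i 0 ≤ v) →
      (∀ i, p ≤ i → i < s.length → v < s.getD i 0) →
      pvScanA v (s.zip L) = if p < min s.length L.length then L.getD p "" else "completely_full" := by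
  intro s
  induction s with
  | nil => intro L p _ _; simp [pvScanA]
  | cons a s' ihs =>
    intro L p h1 h2
    cases L with
    | nil => simp [pvScanA]
    | cons l L' =>
      simp only [List.zip_cons_cons, pvScanA]
      by_cases hv : v < a
      · have hp0 : p = 0 := by
          by_contra h
          have := h1 0 (by omega)
          simp only [List.getD_cons_zero] at this
          omega
        subst hp0
        simp [hv]
      · have hp1 : 1 ≤ p := by
          by_contra h
          have := h2 0 (by omega) (by simp)
          simp only [List.getD_cons_zero] at this
          omega
        have := ihs L' (p - 1)
          (fun i hi => by
            have := h1 (i + 1) (by omega)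
            simpa using this)
          (fun i hi hil => by
            have := h2 (i + 1) (by omega) (by simpa using hil)
            simpa using this)
        simp only [hv, if_false, this]
        have hgd : (l :: L').getD p "" = L'.getD (p - 1) "" := by
          cases p with
          | zero => omega
          | succ q => simp
        by_cases hc : p - 1 < min s'.length L'.length
        · rw [if_pos hc, if_pos (by simp at hc ⊢; omega), hgd]
        · rw [if_neg hc, if_neg (by simp at hc ⊢; omega)]

-- ===== VERDICT =====
theorem get_interval_class_spec : Claim_equal_get_interval_class := by
  unfold Claim_equal_get_interval_class
  intro value intervals _
  unfold Spec_get_interval_class get_interval_class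
  simp only [get_interval_class_alt]
  have hs : (PySem.List.sorted intervals (fun x => x) false).Pairwise (· ≤ ·) :=
    PySem.List.sorted_pairwise intervals (fun x => x)
  obtain ⟨hple, h1, h2⟩ :=
    pvBisect_spec value _ hs (PySem.List.sorted intervals (fun x => x) false).length 0
      (PySem.List.sorted intervals (fun x => x) false).length
      (by omega) (by omega) (le_refl _) (fun i hi => by omega) (fun i hi hil => by omega)
  rw [pv_scan_char value _ pvLabels _ h1 h2]
  rw [show pvLabels.length = 5 from rfl]
  rw [PySem.List.pyGet?_natCast]
  clear h1 h2
  generalize pvBisect value (PySem.List.sorted intervals (fun x => x) false)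
      (PySem.List.sorted intervals (fun x => x) false).length 0
      (PySem.List.sorted intervals (fun x => x) false).length = q at *
  by_cases hc : q < min (PySem.List.sorted intervals (fun x => x) false).length 5
  · rw [if_pos hc, if_pos hc]
    have hq5 : q < 5 := by omega
    interval_cases q <;> rfl
  · rw [if_neg hc, if_neg hc]
    rfl
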